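-- pv_equiv track=rewrite | github.com/FalseNegativeLab/mlscorecheck | mlscorecheck/aggregated/_folding_utils.py | stratified_configurations_sklearn
-- ===== SOURCE A (Python) =====
-- def stratified_configurations_sklearn(p: int,
--                                         n: int,
--                                         n_splits: int) -> list:
--     """
--     The sklearn stratification strategy
--
--     Args:
--         p (int): number of positives
--         n (int): number of negatives
--         n_splits (int): the number of splits
--
--     Returns:
--         list(tuple): the list of the structure of the folds
--     """
--     p_base, p_remainder = divmod(p, n_splits)
--     n_base, n_remainder = divmod(n, n_splits)
--
--     results = [(n_base, p_base)] * n_splits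
--
--     idx = 0
--     while n_remainder > 0:
--         results[idx] = (results[idx][0] + 1, results[idx][1])
--         n_remainder -= 1
--         idx += 1
--         idx %= n_splits
--     while p_remainder > 0:
--         results[idx] = (results[idx][0], results[idx][1] + 1)
--         p_remainder -= 1
--         idx += 1
--         idx %= n_splits
--
--     return results
-- ===== SOURCE B (Python) =====
-- def stratified_configurations_sklearn(p: int,
--                                         n: int,
--                                         n_splits: int) -> list:
--     """Closed-form per-fold counts: one pass over range(n_splits), no mutation."""
--     p_base, p_remainder = divmod(p, n_splits)
--     n_base, n_remainder = divmod(n, n_splits)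
--     return [(n_base + (1 if i < n_remainder else 0),
--              p_base + (1 if (i - n_remainder) % n_splits < p_remainder else 0))
--             for i in range(n_splits)]
-- ===== Notes on version B (the rewrite author's own statement) =====
-- stated objective: simpler
-- what changed: Replaces the replicated list with two mutating remainder-distribution while-loops by a single non-mutating comprehension that computes each fold's (neg,pos) pair in closed form, the positive remainders placed by a modular index test starting at n_remainder.
import Mathlib
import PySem

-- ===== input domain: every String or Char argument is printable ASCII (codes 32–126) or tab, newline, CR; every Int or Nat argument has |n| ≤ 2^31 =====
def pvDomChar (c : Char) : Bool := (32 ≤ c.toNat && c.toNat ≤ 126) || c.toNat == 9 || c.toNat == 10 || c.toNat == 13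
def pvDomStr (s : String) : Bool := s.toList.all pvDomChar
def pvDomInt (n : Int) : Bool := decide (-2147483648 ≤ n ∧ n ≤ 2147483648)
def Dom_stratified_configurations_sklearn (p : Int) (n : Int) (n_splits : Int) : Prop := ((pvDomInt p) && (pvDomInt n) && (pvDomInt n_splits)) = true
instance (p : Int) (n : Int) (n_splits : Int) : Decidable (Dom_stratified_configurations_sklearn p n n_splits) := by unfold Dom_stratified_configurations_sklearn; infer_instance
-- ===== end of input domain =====

-- B replaces A's replicated list and two mutating remainder-distribution while-loops by a
-- single non-mutating pass computing each fold's pair in closed form (objective: simpler).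

-- ===== PORT A =====
-- first while loop: `while n_remainder > 0: results[idx] = (results[idx][0]+1, …); idx = (idx+1) % n_splits`
-- (under Pre_ the index idx is always in range, so getD/set are exact for Python's results[idx])
def pvLoopN (res : List (Int × Int)) (rem : Int) (idx : Int) (n_splits : Int) : List (Int × Int) × Int :=
  if h : rem > 0 then
    pvLoopN (res.set idx.toNat ((res.getD idx.toNat (0, 0)).1 + 1, (res.getD idx.toNat (0, 0)).2))
      (rem - 1) (PySem.Int.mod (idx + 1) n_splits) n_splits
  else (res, idx)
termination_by rem.toNat
decreasing_by omega

-- second while loop, incrementing the positive component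
def pvLoopP (res : List (Int × Int)) (rem : Int) (idx : Int) (n_splits : Int) : List (Int × Int) :=
  if h : rem > 0 then
    pvLoopP (res.set idx.toNat ((res.getD idx.toNat (0, 0)).1, (res.getD idx.toNat (0, 0)).2 + 1))
      (rem - 1) (PySem.Int.mod (idx + 1) n_splits) n_splits
  else res
termination_by rem.toNat
decreasing_by omega

def stratified_configurations_sklearn (p : Int) (n : Int) (n_splits : Int) : List (Int × Int) :=
  let p_base := PySem.Int.floordiv p n_splits
  let p_remainder := PySem.Int.mod p n_splits
  let n_base := PySem.Int.floordiv n n_splits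
  let n_remainder := PySem.Int.mod n n_splits
  let results := List.replicate n_splits.toNat (n_base, p_base)
  let r1 := pvLoopN results n_remainder 0 n_splits
  pvLoopP r1.1 p_remainder r1.2 n_splits

-- ===== PORT B =====
def stratified_configurations_sklearn_alt (p : Int) (n : Int) (n_splits : Int) : List (Int × Int) :=
  let p_base := PySem.Int.floordiv p n_splits
  let p_remainder := PySem.Int.mod p n_splits
  let n_base := PySem.Int.floordiv n n_splits
  let n_remainder := PySem.Int.mod n n_splits
  (PySem.List.pyRange 0 n_splits 1).map (fun i =>
    (n_base + (if i < n_remainder then 1 else 0),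
     p_base + (if PySem.Int.mod (i - n_remainder) n_splits < p_remainder then 1 else 0)))

-- ===== PRECONDITION & SPEC =====
-- Pre_ excludes only n_splits = 0, where Python's divmod raises ZeroDivisionError in both A and B.
def Pre_stratified_configurations_sklearn (p : Int) (n : Int) (n_splits : Int) : Prop := n_splits ≠ 0
instance (p : Int) (n : Int) (n_splits : Int) : Decidable (Pre_stratified_configurations_sklearn p n n_splits) := by unfold Pre_stratified_configurations_sklearn; infer_instance
def pvWitness_stratified_configurations_sklearn : Int × Int × Int := (7, 11, 4)

def Spec_stratified_configurations_sklearn (p : Int) (n : Int) (n_splits : Int) (out : List (Int × Int)) : Prop := out = stratified_configurations_sklearn_alt p n n_splits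
instance (p : Int) (n : Int) (n_splits : Int) (out : List (Int × Int)) : Decidable (Spec_stratified_configurations_sklearn p n n_splits out) := by unfold Spec_stratified_configurations_sklearn; infer_instance

-- ===== CLAIM (what is proved, stated in full; the proofs are below) =====
def Claim_equal_stratified_configurations_sklearn : Prop := ∀ (p : Int) (n : Int) (n_splits : Int), Dom_stratified_configurations_sklearn p n n_splits → Pre_stratified_configurations_sklearn p n n_splits → Spec_stratified_configurations_sklearn p n n_splits (stratified_configurations_sklearn p n n_splits)

-- ===== LEMMAS AND PROOFS =====

lemma pvLoopN_length (res : List (Int × Int)) (rem idx ns : Int) :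
    (pvLoopN res rem idx ns).1.length = res.length := by
  fun_induction pvLoopN with
  | case1 res rem idx ns ih => rw [ih]; simp
  | case2 => rfl

-- elementwise description of the first loop (no wrap: i0 + r < ns)
lemma pvLoopN_get (rn : Nat) (res : List (Int × Int)) (i0 ns : Int)
    (hns : 0 < ns) (hlen : res.length = ns.toNat)
    (h0 : 0 ≤ i0) (hlt : i0 < ns) (hsum : i0 + rn ≤ ns) :
    (∀ k : Nat, (pvLoopN res (rn : Int) i0 ns).1[k]? =
      res[k]?.map (fun e => (e.1 + (if i0 ≤ (k : Int) ∧ (k : Int) < i0 + rn then 1 else 0), e.2))) ∧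
    (pvLoopN res (rn : Int) i0 ns).2 = (if i0 + rn < ns then i0 + rn else 0) := by
  induction rn generalizing res i0 with
  | zero =>
    rw [pvLoopN, dif_neg (by omega)]
    constructor
    · intro k
      cases hres : res[k]? with
      | none => simp
      | some e =>
        simp only [Option.map_some, Option.some.injEq]
        split_ifs with h
        · exfalso; push_cast at h; omega
        · simp
    · split_ifs with h <;> push_cast at h ⊢ <;> omega
  | succ rn ih =>
    have hpos : ((rn+1:Nat):Int) > 0 := by exact_mod_cast Nat.succ_pos rn
    rw [pvLoopN, dif_pos hpos]
    have hsub : ((rn+1:Nat):Int) - 1 = (rn:Int) := by push_cast; ring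
    rw [hsub]
    set i0' := PySem.Int.mod (i0 + 1) ns with hi0'
    push_cast at hsum
    have hchar : (i0 + 1 < ns ∧ i0' = i0 + 1) ∨ (i0 + 1 = ns ∧ i0' = 0) := by
      rcases lt_or_ge (i0+1) ns with h | h
      · exact Or.inl ⟨h, by rw [hi0', PySem.Int.mod_eq_emod_of_pos hns, Int.emod_eq_of_lt (by omega) h]⟩
      · have he : i0 + 1 = ns := by omega
        exact Or.inr ⟨he, by rw [hi0', PySem.Int.mod_eq_emod_of_pos hns, he, Int.emod_self]⟩
    have h0' : 0 ≤ i0' := by rcases hchar with ⟨_,h⟩|⟨_,h⟩ <;> omega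
    have hl' : i0' < ns := by rcases hchar with ⟨h1,h2⟩|⟨h1,h2⟩ <;> omega
    have hkl : i0.toNat < res.length := by omega
    have hlen' : (res.set i0.toNat ((res.getD i0.toNat (0,0)).1 + 1, (res.getD i0.toNat (0,0)).2)).length = ns.toNat := by
      simp [hlen]
    have hsum' : i0' + (rn:Int) ≤ ns := by rcases hchar with ⟨h1,h2⟩|⟨h1,h2⟩ <;> omega
    obtain ⟨ih1, ih2⟩ := ih _ i0' hlen' h0' hl' hsum'
    constructor
    · intro k
      rw [ih1 k]
      by_cases hk : k = i0.toNat
      · subst hk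
        have hres : res[i0.toNat]? = some (res.getD i0.toNat (0,0)) := by
          simp [List.getD_eq_getElem?_getD, List.getElem?_eq_getElem hkl]
        have hset : (res.set i0.toNat ((res.getD i0.toNat (0,0)).1 + 1, (res.getD i0.toNat (0,0)).2))[i0.toNat]? =
            some ((res.getD i0.toNat (0,0)).1 + 1, (res.getD i0.toNat (0,0)).2) := by
          rw [List.getElem?_eq_getElem (by simpa using hkl)]
          simp
        rw [hset, hres]
        simp only [Option.map_some, Option.some.injEq, Prod.mk.injEq]
        have hki : ((i0.toNat : Nat) : Int) = i0 := by omega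
        refine ⟨?_, by trivial⟩
        rw [hki]
        rcases hchar with ⟨h1,h2⟩|⟨h1,h2⟩ <;> rw [h2] <;> push_cast <;> split_ifs <;> omega
      · rw [List.getElem?_set_ne (by omega)]
        cases hres : res[k]? with
        | none => simp
        | some e =>
          have hkn : k < res.length := (List.getElem?_eq_some_iff.mp hres).1
          have hki : (k:Int) < ns := by omega
          have hkne : (k:Int) ≠ i0 := by omega
          simp only [Option.map_some, Option.some.injEq, Prod.mk.injEq]
          refine ⟨?_, by trivial⟩
          rcases hchar with ⟨h1,h2⟩|⟨h1,h2⟩ <;> rw [h2] <;> push_cast <;> split_ifs <;> omega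
    · rw [ih2]
      rcases hchar with ⟨h1,h2⟩|⟨h1,h2⟩ <;> rw [h2] <;> push_cast <;> split_ifs <;> omega

-- elementwise description of the second loop (may wrap once)
lemma pvLoopP_get (rn : Nat) (res : List (Int × Int)) (i0 ns : Int)
    (hns : 0 < ns) (hlen : res.length = ns.toNat)
    (h0 : 0 ≤ i0) (hlt : i0 < ns) (hr : (rn : Int) ≤ ns) :
    ∀ k : Nat, (pvLoopP res (rn : Int) i0 ns)[k]? =
      res[k]?.map (fun e => (e.1,
        e.2 + (if (i0 ≤ (k : Int) ∧ (k : Int) < i0 + rn) ∨ ((k : Int) + ns < i0 + rn) then 1 else 0))) := by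
  induction rn generalizing res i0 with
  | zero =>
    intro k
    rw [pvLoopP, dif_neg (by omega)]
    cases hres : res[k]? with
    | none => simp
    | some e =>
      have hk : k < res.length := (List.getElem?_eq_some_iff.mp hres).1
      simp only [Option.map_some, Option.some.injEq]
      split_ifs with h
      · exfalso; push_cast at h; omega
      · simp
  | succ rn ih =>
    have hpos : ((rn+1:Nat):Int) > 0 := by exact_mod_cast Nat.succ_pos rn
    rw [pvLoopP, dif_pos hpos]
    have hsub : ((rn+1:Nat):Int) - 1 = (rn:Int) := by push_cast; ring
    rw [hsub]
    set i0' := PySem.Int.mod (i0 + 1) ns with hi0'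
    have hchar : (i0 + 1 < ns ∧ i0' = i0 + 1) ∨ (i0 + 1 = ns ∧ i0' = 0) := by
      rcases lt_or_ge (i0+1) ns with h | h
      · exact Or.inl ⟨h, by rw [hi0', PySem.Int.mod_eq_emod_of_pos hns, Int.emod_eq_of_lt (by omega) h]⟩
      · have he : i0 + 1 = ns := by omega
        exact Or.inr ⟨he, by rw [hi0', PySem.Int.mod_eq_emod_of_pos hns, he, Int.emod_self]⟩
    have h0' : 0 ≤ i0' := by rcases hchar with ⟨_,h⟩|⟨_,h⟩ <;> omega
    have hl' : i0' < ns := by rcases hchar with ⟨h1,h2⟩|⟨h1,h2⟩ <;> omega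
    have hkl : i0.toNat < res.length := by omega
    have hlen' : (res.set i0.toNat ((res.getD i0.toNat (0,0)).1, (res.getD i0.toNat (0,0)).2 + 1)).length = ns.toNat := by
      simp [hlen]
    intro k
    rw [ih _ i0' hlen' h0' hl' (by push_cast at hr ⊢; omega) k]
    by_cases hk : k = i0.toNat
    · subst hk
      have hres : res[i0.toNat]? = some (res.getD i0.toNat (0,0)) := by
        simp [List.getD_eq_getElem?_getD, List.getElem?_eq_getElem hkl]
      have hset : (res.set i0.toNat ((res.getD i0.toNat (0,0)).1, (res.getD i0.toNat (0,0)).2 + 1))[i0.toNat]? =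
          some ((res.getD i0.toNat (0,0)).1, (res.getD i0.toNat (0,0)).2 + 1) := by
        rw [List.getElem?_eq_getElem (by simpa using hkl)]
        simp
      rw [hset, hres]
      simp only [Option.map_some, Option.some.injEq, Prod.mk.injEq]
      have hki : ((i0.toNat : Nat) : Int) = i0 := by omega
      refine ⟨by trivial, ?_⟩
      rw [hki]
      rcases hchar with ⟨h1,h2⟩|⟨h1,h2⟩ <;> rw [h2] <;> push_cast <;> split_ifs <;> omega
    · rw [List.getElem?_set_ne (by omega)]
      cases hres : res[k]? with
      | none => simp
      | some e =>
        have hkn : k < res.length := (List.getElem?_eq_some_iff.mp hres).1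
        have hki : (k:Int) < ns := by omega
        have hkne : (k:Int) ≠ i0 := by omega
        simp only [Option.map_some, Option.some.injEq, Prod.mk.injEq]
        refine ⟨by trivial, ?_⟩
        rcases hchar with ⟨h1,h2⟩|⟨h1,h2⟩ <;> rw [h2] <;> push_cast <;> split_ifs <;> omega

-- the modular test of B equals the wrap condition of A's second loop
lemma pv_mod_cond (k i0 r ns : Int) (hns : 0 < ns) (hk0 : 0 ≤ k) (hk : k < ns)
    (hi0 : 0 ≤ i0) (hi : i0 < ns) (hr0 : 0 ≤ r) (hr : r < ns) :
    (PySem.Int.mod (k - i0) ns < r) ↔ ((i0 ≤ k ∧ k < i0 + r) ∨ (k + ns < i0 + r)) := by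
  rw [PySem.Int.mod_eq_emod_of_pos hns]
  rcases le_or_gt i0 k with hle | hgt
  · have h1 : (k - i0) % ns = k - i0 := Int.emod_eq_of_lt (by omega) (by omega)
    rw [h1]; omega
  · have h1 : (k - i0 + ns * 1) % ns = (k - i0) % ns := Int.add_mul_emod_self_left _ _ _
    have h2 : (k - i0 + ns * 1) % ns = k - i0 + ns * 1 := Int.emod_eq_of_lt (by omega) (by omega)
    omega

-- ===== VERDICT (by name: the statement is the Claim_ definition above) =====
theorem stratified_configurations_sklearn_spec : Claim_equal_stratified_configurations_sklearn := by
  intro p n ns hdom hpre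
  unfold Pre_stratified_configurations_sklearn at hpre
  unfold Spec_stratified_configurations_sklearn
  simp only [stratified_configurations_sklearn, stratified_configurations_sklearn_alt]
  rcases lt_or_gt_of_ne hpre with hneg | hpos
  · -- ns < 0 : both sides are []
    have h1 : ns.toNat = 0 := by omega
    have hmn := PySem.Int.mod_neg_bounds (a := n) hneg
    have hmp := PySem.Int.mod_neg_bounds (a := p) hneg
    rw [h1]
    rw [pvLoopN, dif_neg (by omega)]
    rw [pvLoopP, dif_neg (by omega)]
    rw [PySem.List.pyRange_one_eq_nil (by omega)]
    rfl
  · -- ns > 0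
    have hnr0 : 0 ≤ PySem.Int.mod n ns := PySem.Int.mod_nonneg n hpos
    have hnrl : PySem.Int.mod n ns < ns := PySem.Int.mod_lt n hpos
    have hpr0 : 0 ≤ PySem.Int.mod p ns := PySem.Int.mod_nonneg p hpos
    have hprl : PySem.Int.mod p ns < ns := PySem.Int.mod_lt p hpos
    set nb := PySem.Int.floordiv n ns with hnb
    set pb := PySem.Int.floordiv p ns with hpb
    set nr := PySem.Int.mod n ns with hnr
    set pr := PySem.Int.mod p ns with hpr
    set res0 : List (Int × Int) := List.replicate ns.toNat (nb, pb) with hres0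
    have hcastn : ((nr.toNat : Nat) : Int) = nr := Int.toNat_of_nonneg hnr0
    have hcastp : ((pr.toNat : Nat) : Int) = pr := Int.toNat_of_nonneg hpr0
    obtain ⟨hN1, hN2⟩ := pvLoopN_get nr.toNat res0 0 ns hpos (by simp [hres0]) (le_refl 0) hpos (by omega)
    rw [hcastn] at hN1 hN2
    have hidx : (pvLoopN res0 nr 0 ns).2 = nr := by rw [hN2]; split_ifs <;> omega
    rw [hidx]
    have hP := pvLoopP_get pr.toNat (pvLoopN res0 nr 0 ns).1 nr ns hpos
      (by rw [pvLoopN_length]; simp [hres0]) hnr0 hnrl (by omega)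
    rw [hcastp] at hP
    apply List.ext_getElem?
    intro k
    rw [hP k, hN1 k]
    by_cases hk : k < ns.toNat
    · have hres0k : res0[k]? = some (nb, pb) := by
        rw [hres0, List.getElem?_replicate, if_pos hk]
      rw [hres0k]
      have hrhs : ((PySem.List.pyRange 0 ns 1).map (fun i =>
          (nb + (if i < nr then 1 else 0), pb + (if PySem.Int.mod (i - nr) ns < pr then 1 else 0))))[k]? =
          some (nb + (if ((k:Int)) < nr then 1 else 0),
                pb + (if PySem.Int.mod (((k:Int)) - nr) ns < pr then 1 else 0)) := by
        rw [List.getElem?_map, PySem.List.getElem?_pyRange_one, if_pos (by omega)]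
        simp
      rw [hrhs]
      simp only [Option.map_some, Option.some.injEq, Prod.mk.injEq]
      constructor
      · split_ifs <;> omega
      · simp only [pv_mod_cond (k:Int) nr pr ns hpos (by omega) (by omega) hnr0 hnrl hpr0 hprl]
    · have hnone : res0[k]? = none := by
        rw [hres0, List.getElem?_replicate, if_neg hk]
      rw [hnone]
      have : ((PySem.List.pyRange 0 ns 1).map (fun i =>
          (nb + (if i < nr then 1 else 0), pb + (if PySem.Int.mod (i - nr) ns < pr then 1 else 0))))[k]? = none := by
        rw [List.getElem?_eq_none_iff]
        simp [PySem.List.length_pyRange_one]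
        omega
      rw [this]
      rfl
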